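-- pv_equiv track=rewrite | github.com/PBrus/Interactive-diagrams | photometric_diagrams.py | colxdata
-- ===== SOURCE A (Python) =====
-- def colxdata(dat, clms):
--     id1 = -1
--     id2 = -1
--     for i,d in enumerate(dat):
--         if clms[0] in d[:-1]:
--             id1 = i
--         if clms[1] in d[:-1]:
--             id2 = i
--
--     return id1,id2
-- ===== SOURCE B (Python) =====
-- def colxdata(dat, clms):
--     id1 = -1
--     id2 = -1
--     for i in range(len(dat) - 1, -1, -1):
--         d = dat[i]
--         if id1 == -1 and clms[0] in d[:-1]:
--             id1 = i
--         if id2 == -1 and clms[1] in d[:-1]: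
--             id2 = i
--         if id1 != -1 and id2 != -1:
--             break
--     return id1, id2
-- ===== Notes on version B (the rewrite author's own statement) =====
-- stated objective: alternative
-- what changed: B scans the rows backwards with an explicit reverse index range, records the first backward hit for each column name and breaks as soon as both are found, instead of A's full forward sweep that keeps overwriting the last match.
import Mathlib
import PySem

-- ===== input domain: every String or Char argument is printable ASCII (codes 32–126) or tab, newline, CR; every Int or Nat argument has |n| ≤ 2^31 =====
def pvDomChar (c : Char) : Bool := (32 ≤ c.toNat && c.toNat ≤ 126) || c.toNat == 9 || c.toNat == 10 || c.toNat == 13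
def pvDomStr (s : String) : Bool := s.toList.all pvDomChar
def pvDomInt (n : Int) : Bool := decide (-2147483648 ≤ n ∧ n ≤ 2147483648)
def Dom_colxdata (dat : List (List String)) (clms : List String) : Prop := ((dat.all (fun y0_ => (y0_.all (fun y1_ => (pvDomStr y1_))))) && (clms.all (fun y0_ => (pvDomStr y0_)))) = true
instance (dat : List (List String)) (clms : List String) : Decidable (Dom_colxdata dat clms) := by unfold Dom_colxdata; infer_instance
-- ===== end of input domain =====

-- B scans the rows backwards and breaks as soon as both names are found; A sweeps forward
-- keeping the last match (alternative decomposition, same return value).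

-- ===== PORT A =====
def colxdata (dat : List (List String)) (clms : List String) : Int × Int :=
  (PySem.List.enumerate dat 0).foldl
    (fun st p =>
      ((if PySem.List.pyGetD clms 0 "" ∈ PySem.List.slice p.2 none (some (-1)) then p.1 else st.1),
       (if PySem.List.pyGetD clms 1 "" ∈ PySem.List.slice p.2 none (some (-1)) then p.1 else st.2)))
    (-1, -1)

-- ===== PORT B =====
-- the for-loop of Source B with its break, as structural recursion over the countdown index range
def colxdataLoopB (dat : List (List String)) (clms : List String) :
    List Int → Int × Int → Int × Int
  | [], st => st
  | i :: rest, (id1, id2) =>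
    let d := PySem.List.pyGetD dat i []
    let id1' : Int := if id1 = -1 ∧ PySem.List.pyGetD clms 0 "" ∈ PySem.List.slice d none (some (-1)) then i else id1
    let id2' : Int := if id2 = -1 ∧ PySem.List.pyGetD clms 1 "" ∈ PySem.List.slice d none (some (-1)) then i else id2
    if id1' ≠ -1 ∧ id2' ≠ -1 then (id1', id2')
    else colxdataLoopB dat clms rest (id1', id2')

def colxdata_alt (dat : List (List String)) (clms : List String) : Int × Int :=
  colxdataLoopB dat clms (PySem.List.pyRange ((dat.length : Int) - 1) (-1) (-1)) (-1, -1)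

-- ===== PRECONDITION & SPEC =====
-- Pre_ excludes exactly the inputs where A raises IndexError (clms[0]/clms[1] are read whenever
-- dat is nonempty, so then clms needs at least two entries; B raises IndexError there too).
def Pre_colxdata (dat : List (List String)) (clms : List String) : Prop :=
  dat = [] ∨ 2 ≤ clms.length
instance (dat : List (List String)) (clms : List String) : Decidable (Pre_colxdata dat clms) := by unfold Pre_colxdata; infer_instance

def pvWitness_colxdata : List (List String) × List String :=
  ([["a", "b", "x"], ["c", "a", "y"]], ["a", "c"])

def Spec_colxdata (dat : List (List String)) (clms : List String) (out : Int × Int) : Prop := out = colxdata_alt dat clms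
instance (dat : List (List String)) (clms : List String) (out : Int × Int) : Decidable (Spec_colxdata dat clms out) := by unfold Spec_colxdata; infer_instance

-- ===== CLAIM (what is proved, stated in full; the proofs are below) =====
def Claim_equal_colxdata : Prop := ∀ (dat : List (List String)) (clms : List String), Dom_colxdata dat clms → Pre_colxdata dat clms → Spec_colxdata dat clms (colxdata dat clms)

-- ===== LEMMAS AND PROOFS =====

-- first index in the list satisfying P, else the accumulator
def pvFirstHitD (P : Int → Prop) [DecidablePred P] : List Int → Int → Int
  | [], acc => acc
  | i :: rest, acc => if P i then i else pvFirstHitD P rest acc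

lemma pvFirstHitD_append (P : Int → Prop) [DecidablePred P] (xs : List Int) (i acc : Int) :
    pvFirstHitD P (xs ++ [i]) acc = pvFirstHitD P xs (if P i then i else acc) := by
  induction xs with
  | nil => rfl
  | cons x xs ih => simp only [List.cons_append, pvFirstHitD, ih]

-- A's one-component fold keeps the LAST hit = first hit of the reversed list
lemma pvFoldl_eq_firstHitD_reverse (P : Int → Prop) [DecidablePred P] (is : List Int) (acc : Int) :
    is.foldl (fun a j => if P j then j else a) acc = pvFirstHitD P is.reverse acc := by
  induction is generalizing acc with
  | nil => rfl
  | cons i rest ih => simp only [List.foldl_cons, ih, List.reverse_cons, pvFirstHitD_append]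

-- B's loop with break computes, componentwise, the first hit of the index list
lemma pvLoopB_char (dat : List (List String)) (clms : List String) :
    ∀ (is : List Int), (∀ i ∈ is, (0:Int) ≤ i) → ∀ (id1 id2 : Int),
      colxdataLoopB dat clms is (id1, id2) =
        ((if id1 = -1 then pvFirstHitD (fun j => PySem.List.pyGetD clms 0 "" ∈ PySem.List.slice (PySem.List.pyGetD dat j ([] : List String)) none (some (-1))) is id1 else id1),
         (if id2 = -1 then pvFirstHitD (fun j => PySem.List.pyGetD clms 1 "" ∈ PySem.List.slice (PySem.List.pyGetD dat j ([] : List String)) none (some (-1))) is id2 else id2)) := by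
  intro is
  induction is with
  | nil => intro _ id1 id2; simp [colxdataLoopB, pvFirstHitD]
  | cons i rest ih =>
    intro hnn id1 id2
    have hi : (0:Int) ≤ i := hnn i (by simp)
    have hrest : ∀ j ∈ rest, (0:Int) ≤ j := fun j hj => hnn j (by simp [hj])
    have hine : i ≠ -1 := by omega
    simp only [colxdataLoopB, pvFirstHitD]
    by_cases h0 : PySem.List.pyGetD clms 0 "" ∈ PySem.List.slice (PySem.List.pyGetD dat i ([] : List String)) none (some (-1)) <;>
    by_cases h1 : PySem.List.pyGetD clms 1 "" ∈ PySem.List.slice (PySem.List.pyGetD dat i ([] : List String)) none (some (-1)) <;>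
    by_cases ha : id1 = -1 <;> by_cases hb : id2 = -1 <;>
      simp [ha, hb, h0, h1, hine, ih hrest]

-- Source B's countdown range is the reverse of the ascending range A walks
lemma pvRange_countdown_eq (n : Nat) :
    PySem.List.pyRange ((n : Int) - 1) (-1) (-1) = (PySem.List.pyRange 0 (n : Int) 1).reverse := by
  rw [PySem.List.pyRange_neg_one, PySem.List.pyRange_one]
  apply List.ext_getElem
  · simp only [List.length_map, List.length_range, List.length_reverse]
    omega
  · intro k h1 h2
    simp only [List.length_map, List.length_range] at h1 h2
    simp only [List.getElem_map, List.getElem_range, List.getElem_reverse, List.length_map,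
      List.length_range]
    have hk : k < n := by omega
    omega

-- ===== VERDICT (by name: the statement is the Claim_ definition above) =====
theorem colxdata_spec : Claim_equal_colxdata := by
  intro dat clms _ _
  unfold Spec_colxdata colxdata colxdata_alt
  have hnn : ∀ i ∈ PySem.List.pyRange ((dat.length : Int) - 1) (-1) (-1), (0:Int) ≤ i := by
    intro i hi
    rw [pvRange_countdown_eq] at hi
    rw [List.mem_reverse, PySem.List.mem_pyRange_one] at hi
    exact hi.1
  rw [pvLoopB_char dat clms _ hnn, pvRange_countdown_eq]
  rw [PySem.List.enumerate_eq_map_pyRange dat ([] : List String), List.foldl_map]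
  rw [PySem.List.foldl_prod_mk
        (f := fun (a j : Int) => if PySem.List.pyGetD clms 0 "" ∈ PySem.List.slice (PySem.List.pyGetD dat j ([] : List String)) none (some (-1)) then j else a)
        (g := fun (a j : Int) => if PySem.List.pyGetD clms 1 "" ∈ PySem.List.slice (PySem.List.pyGetD dat j ([] : List String)) none (some (-1)) then j else a)]
  rw [pvFoldl_eq_firstHitD_reverse, pvFoldl_eq_firstHitD_reverse]
  simp [PySem.List.len]
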